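-- pv_equiv track=rewrite | github.com/Engagic/engagic | backend/core/async_processor.py | _simple_chunk
-- ===== SOURCE A (Python) =====
-- from typing import List, Dict, Any, Optional, Union
--
-- def _simple_chunk(text: str, chunk_size: int) -> List[str]:
--     """Fallback chunking by character count with page boundaries"""
--     chunks = []
--     start = 0
--
--     while start < len(text):
--         end = start + chunk_size
--
--         # Try to break on page boundary
--         if end < len(text):
--             page_break = text.rfind("--- PAGE", start, end)
--             if page_break > start + chunk_size // 2:
--                 end = page_break
--
--         chunks.append(text[start:end])
--         start = end
--
--     return chunks
-- ===== SOURCE B (Python) =====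
-- from typing import List
--
-- _MARKER = "--- PAGE"
--
-- def _simple_chunk(text: str, chunk_size: int) -> List[str]:
--     """Chunk by character count, breaking on page markers.
--
--     One pre-scan collects every occurrence of the page marker; each window
--     then finds its break point by binary search in that sorted offset list
--     instead of an rfind scan over the window.
--     """
--     # collect all marker start offsets (ascending)
--     offs = []
--     i = text.find(_MARKER)
--     while i != -1:
--         offs.append(i)
--         i = text.find(_MARKER, i + 1)
--
--     n = len(text)
--     mlen = len(_MARKER)
--     chunks = []
--     start = 0
--     while start < n:
--         end = start + chunk_size
--         if end < n:
--             # binary search: lo = number of offsets p with p + mlen <= end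
--             lo, hi = 0, len(offs)
--             while lo < hi:
--                 mid = (lo + hi) // 2
--                 if offs[mid] + mlen <= end:
--                     lo = mid + 1
--                 else:
--                     hi = mid
--             if lo > 0 and offs[lo - 1] > start + chunk_size // 2:
--                 end = offs[lo - 1]
--         chunks.append(text[start:end])
--         start = end
--     return chunks
-- ===== Notes on version B (the rewrite author's own statement) =====
-- stated objective: alternative
-- what changed: A rescans each window with rfind; B pre-scans the text once for all '--- PAGE' offsets and picks each window's break point by binary search in that sorted offset list.
import Mathlib
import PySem

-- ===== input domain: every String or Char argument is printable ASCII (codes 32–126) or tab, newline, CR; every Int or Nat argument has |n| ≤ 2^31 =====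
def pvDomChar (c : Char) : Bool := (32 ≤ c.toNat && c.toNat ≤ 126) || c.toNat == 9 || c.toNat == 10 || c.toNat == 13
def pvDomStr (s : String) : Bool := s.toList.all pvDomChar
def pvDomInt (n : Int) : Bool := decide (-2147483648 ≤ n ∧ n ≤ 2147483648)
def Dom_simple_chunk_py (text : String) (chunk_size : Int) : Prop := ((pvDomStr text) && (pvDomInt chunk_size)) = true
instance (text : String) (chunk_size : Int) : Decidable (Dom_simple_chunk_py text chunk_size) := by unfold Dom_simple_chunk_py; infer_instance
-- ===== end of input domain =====

-- B replaces A's per-window rfind by one pre-scan collecting all "--- PAGE" offsets plus a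
-- binary search per window (objective: alternative decomposition; no speed claim).

-- ===== PORT A =====
-- the page-break marker literal
def pvMarker : List Char := "--- PAGE".toList

-- A's loop body: end = start + chunk_size, moved back to an rfind page break when found
def pvEndA (s : List Char) (cs start : Int) : Int :=
  let end0 := start + cs
  if end0 < (s.length : Int) then
    let pb := PySem.Chars.rfindFrom s pvMarker start (some end0)
    if pb > start + PySem.Int.floordiv cs 2 then pb else end0
  else end0

-- A's while loop; fuel bounds the iteration count (inside Pre_ each iteration strictly
-- increases start, so text.length + 1 iterations always suffice)
def pvLoopA (s : List Char) (cs : Int) : Nat → List (List Char) → Int → List (List Char)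
  | 0, chunks, _ => chunks
  | fuel+1, chunks, start =>
    if start < (s.length : Int) then
      pvLoopA s cs fuel (chunks ++ [PySem.Chars.slice s (some start) (some (pvEndA s cs start))])
        (pvEndA s cs start)
    else chunks

def simple_chunk_py (text : String) (chunk_size : Int) : List String :=
  (pvLoopA text.toList chunk_size (text.toList.length + 1) [] 0).map (fun c => String.ofList c)

-- ===== PORT B =====
-- B's pre-scan: i = text.find(marker); while i != -1: offs.append(i); i = text.find(marker, i+1)
def pvFindLoop (s m : List Char) : Nat → List Int → Int → List Int
  | 0, offs, _ => offs
  | fuel+1, offs, i =>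
    if i ≠ -1 then
      pvFindLoop s m fuel (offs ++ [i]) (PySem.Chars.findFrom s m (i+1) none)
    else offs

-- B's hand-written binary search (lo,hi while-loop): on return lo counts offsets p with p + mlen ≤ limit
def pvBis (offs : List Int) (mlen limit : Int) (lo hi : Int) : Int :=
  if h : lo < hi then
    let mid := PySem.Int.floordiv (lo + hi) 2
    if PySem.List.pyGetD offs mid 0 + mlen ≤ limit then pvBis offs mlen limit (mid + 1) hi
    else pvBis offs mlen limit lo mid
  else lo
termination_by (hi - lo).toNat
decreasing_by
  · have h1 := PySem.Int.floordiv_two_mid_bounds (le_of_lt h)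
    omega
  · have h1 := PySem.Int.floordiv_two_mid_bounds (le_of_lt h)
    have h2 : PySem.Int.floordiv (lo + hi) 2 < hi := by
      rw [PySem.Int.floordiv_lt_iff_lt_mul (by omega)]
      omega
    omega

-- B's loop body: the break point is looked up by binary search in the offset list
def pvEndB (s : List Char) (cs : Int) (offs : List Int) (start : Int) : Int :=
  let end0 := start + cs
  if end0 < (s.length : Int) then
    let lo := pvBis offs (pvMarker.length : Int) end0 0 (offs.length : Int)
    if lo > 0 ∧ PySem.List.pyGetD offs (lo - 1) 0 > start + PySem.Int.floordiv cs 2 then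
      PySem.List.pyGetD offs (lo - 1) 0
    else end0
  else end0

def pvLoopB (s : List Char) (cs : Int) (offs : List Int) : Nat → List (List Char) → Int → List (List Char)
  | 0, chunks, _ => chunks
  | fuel+1, chunks, start =>
    if start < (s.length : Int) then
      pvLoopB s cs offs fuel (chunks ++ [PySem.Chars.slice s (some start) (some (pvEndB s cs offs start))])
        (pvEndB s cs offs start)
    else chunks

def simple_chunk_py_alt (text : String) (chunk_size : Int) : List String :=
  let s := text.toList
  let offs := pvFindLoop s pvMarker (s.length + 1) [] (PySem.Chars.find s pvMarker)
  (pvLoopB s chunk_size offs (s.length + 1) [] 0).map (fun c => String.ofList c)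

-- ===== PRECONDITION & SPEC =====
-- Pre_ excludes non-empty text with chunk_size ≤ 0: there A's while loop never terminates
-- (start can never reach len(text)), so A returns on exactly the inputs admitted here.
def Pre_simple_chunk_py (text : String) (chunk_size : Int) : Prop := text = "" ∨ 1 ≤ chunk_size
instance (text : String) (chunk_size : Int) : Decidable (Pre_simple_chunk_py text chunk_size) := by unfold Pre_simple_chunk_py; infer_instance

def pvWitness_simple_chunk_py : String × Int := ("ab--- PAGEcd--- PAGEef", 6)

def Spec_simple_chunk_py (text : String) (chunk_size : Int) (out : List String) : Prop := out = simple_chunk_py_alt text chunk_size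
instance (text : String) (chunk_size : Int) (out : List String) : Decidable (Spec_simple_chunk_py text chunk_size out) := by unfold Spec_simple_chunk_py; infer_instance

-- ===== CLAIM (what is proved, stated in full; the proofs are below) =====
def Claim_equal_simple_chunk_py : Prop := ∀ (text : String) (chunk_size : Int), Dom_simple_chunk_py text chunk_size → Pre_simple_chunk_py text chunk_size → Spec_simple_chunk_py text chunk_size (simple_chunk_py text chunk_size)

-- ===== LEMMAS AND PROOFS =====

-- occurrence positions of the marker in s, ascending
def pvOccs (s : List Char) : List Nat := (List.range s.length).filter (fun j => decide (pvMarker <+: s.drop j))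

theorem pvMem_occs {s : List Char} {j : Nat} : j ∈ pvOccs s ↔ pvMarker <+: s.drop j := by
  unfold pvOccs
  simp only [List.mem_filter, List.mem_range, decide_eq_true_eq]
  constructor
  · exact fun h => h.2
  · intro h
    refine ⟨?_, h⟩
    have := h.length_le
    simp [List.length_drop] at this
    have hm : pvMarker.length = 8 := by decide
    omega

theorem pvOccs_sorted (s : List Char) : (pvOccs s).Pairwise (· < ·) :=
  List.Pairwise.filter _ List.pairwise_lt_range

theorem pvRfindGo_spec (s : List Char) (j : Nat) :
    (PySem.Chars.rfind.go s pvMarker j = -1 ∧ ∀ i ≤ j, ¬ pvMarker <+: s.drop i) ∨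
    (∃ i : Nat, i ≤ j ∧ pvMarker <+: s.drop i ∧ PySem.Chars.rfind.go s pvMarker j = (i : Int) ∧
      ∀ i', i' ≤ j → pvMarker <+: s.drop i' → i' ≤ i) := by
  induction j with
  | zero =>
    by_cases hp : pvMarker <+: s
    · right
      exact ⟨0, le_refl 0, by simpa using hp, by simp [PySem.Chars.rfind.go, List.isPrefixOf_iff_prefix, hp], fun i' h1 _ => h1⟩
    · left
      constructor
      · simp [PySem.Chars.rfind.go, List.isPrefixOf_iff_prefix, hp]
      · intro i hi
        interval_cases i
        simpa using hp
  | succ j ih =>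
    by_cases hp : pvMarker <+: s.drop (j+1)
    · right
      refine ⟨j+1, le_refl _, hp, ?_, fun i' h1 _ => h1⟩
      simp [PySem.Chars.rfind.go, List.isPrefixOf_iff_prefix, hp]
    · have hgo : PySem.Chars.rfind.go s pvMarker (j+1) = PySem.Chars.rfind.go s pvMarker j := by
        simp [PySem.Chars.rfind.go, List.isPrefixOf_iff_prefix, hp]
      rcases ih with ⟨h1, h2⟩ | ⟨i, hi, hpre, hval, hmax⟩
      · left
        refine ⟨hgo.trans h1, fun i hi => ?_⟩
        rcases Nat.lt_succ_iff_lt_or_eq.mp (Nat.lt_succ_of_le hi) with h | h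
        · exact h2 i (by omega)
        · subst h; exact hp
      · right
        refine ⟨i, by omega, hpre, hgo.trans hval, fun i' h1 h2 => ?_⟩
        rcases Nat.lt_succ_iff_lt_or_eq.mp (Nat.lt_succ_of_le h1) with h | h
        · exact hmax i' (by omega) h2
        · subst h; exact absurd h2 hp

theorem pvSub_prefix (s : List Char) (st e i : Nat) (hes : e ≤ s.length) :
    pvMarker <+: ((s.take e).drop st).drop i ↔ pvMarker <+: s.drop (st + i) ∧ st + i + 8 ≤ e := by
  rw [List.drop_drop, List.drop_take]
  rw [List.prefix_take_iff]
  have hm : pvMarker.length = 8 := by decide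
  constructor
  · rintro ⟨h1, h2⟩
    refine ⟨h1, ?_⟩
    have := h1.length_le
    simp [List.length_drop] at this
    omega
  · rintro ⟨h1, h2⟩
    exact ⟨h1, by omega⟩

theorem pvRfindFrom_spec (s : List Char) (st e : Nat) (hse : st ≤ e) (hes : e ≤ s.length) :
    (PySem.Chars.rfindFrom s pvMarker (st : Int) (some (e : Int)) = -1 ∧
      ∀ i : Nat, st ≤ i → i + 8 ≤ e → ¬ pvMarker <+: s.drop i) ∨
    (∃ i : Nat, st ≤ i ∧ i + 8 ≤ e ∧ pvMarker <+: s.drop i ∧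
      PySem.Chars.rfindFrom s pvMarker (st : Int) (some (e : Int)) = (i : Int) ∧
      ∀ i' : Nat, st ≤ i' → i' + 8 ≤ e → pvMarker <+: s.drop i' → i' ≤ i) := by
  have he' : ¬ ((s.length : Int) < (e : Int)) := by exact_mod_cast not_lt.mpr (by exact_mod_cast hes)
  have hst' : ¬ ((st : Int) < 0) := by omega
  have hee' : ¬ ((e : Int) < 0) := by omega
  have hlt : ¬ ((e : Int) < (st : Int)) := by exact_mod_cast not_lt.mpr (by exact_mod_cast hse)
  simp only [PySem.Chars.rfindFrom, he', hst', hee', hlt, if_neg, if_false, PySem.Chars.rfind,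
    Int.toNat_natCast]
  set sub := (s.take e).drop st with hsub
  have hsublen : sub.length = e - st := by
    simp [hsub, List.length_drop, List.length_take]
    omega
  rcases pvRfindGo_spec sub sub.length with ⟨h1, h2⟩ | ⟨i, hi, hpre, hval, hmax⟩
  · left
    rw [h1]
    refine ⟨by simp, fun i hsti hie hpre => ?_⟩
    have : pvMarker <+: sub.drop (i - st) := by
      rw [pvSub_prefix s st e (i - st) hes]
      constructor
      · have : st + (i - st) = i := by omega
        rw [this]; exact hpre
      · omega
    exact h2 (i - st) (by omega) this
  · right
    rw [hval]
    have hc := (pvSub_prefix s st e i hes).mp hpre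
    refine ⟨st + i, by omega, by omega, hc.1, by simp, ?_⟩
    intro i' h1 h2 h3
    have : pvMarker <+: sub.drop (i' - st) := by
      rw [pvSub_prefix s st e (i' - st) hes]
      have : st + (i' - st) = i' := by omega
      rw [this]; exact ⟨h3, by omega⟩
    have := hmax (i' - st) (by omega) this
    omega

theorem pvFilter_min (l : List Nat) (hp : l.Pairwise (· < ·)) (a k : Nat) (ha : a ∈ l) (hk : k ≤ a)
    (hmin : ∀ j ∈ l, k ≤ j → a ≤ j) :
    l.filter (fun j => decide (k ≤ j)) = a :: l.filter (fun j => decide (a + 1 ≤ j)) := by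
  induction l with
  | nil => simp at ha
  | cons x t ih =>
    rcases List.mem_cons.mp ha with hax | hat
    · subst hax
      have hgt : ∀ j ∈ t, a < j := fun j hj => (List.pairwise_cons.mp hp).1 j hj
      simp only [List.filter_cons, decide_eq_true_eq]
      rw [if_pos (by simpa using hk), if_neg (by simp)]
      congr 1
      have h1 : t.filter (fun j => decide (k ≤ j)) = t :=
        List.filter_eq_self.mpr (fun j hj => by have := hgt j hj; simp; omega)
      have h2 : t.filter (fun j => decide (a + 1 ≤ j)) = t :=
        List.filter_eq_self.mpr (fun j hj => by have := hgt j hj; simp; omega)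
      rw [h1, h2]
    · have hxa : x < a := by
        rcases Nat.lt_or_ge x a with h | h
        · exact h
        · exfalso
          have : x < a := by
            by_contra hcon
            have hka : k ≤ x := by omega
            have := hmin x (List.mem_cons_self ..) hka
            have := (List.pairwise_cons.mp hp).1 a hat
            omega
          omega
      have hkx : ¬ k ≤ x := by
        intro hkx
        have := hmin x (List.mem_cons_self ..) hkx
        omega
      simp only [List.filter_cons, decide_eq_true_eq]
      rw [if_neg (by simpa using hkx), if_neg (by simp; omega)]
      exact ih (List.pairwise_cons.mp hp).2 hat (fun j hj hkj => hmin j (List.mem_cons_of_mem _ hj) hkj)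

theorem pvFindLoop_spec (s : List Char) : ∀ (fuel k : Nat) (acc : List Int), k ≤ s.length →
    s.length + 1 - k ≤ fuel →
    pvFindLoop s pvMarker fuel acc (PySem.Chars.findFrom s pvMarker (k : Int) none) =
      acc ++ ((pvOccs s).filter (fun j => decide (k ≤ j))).map Int.ofNat := by
  intro fuel
  induction fuel with
  | zero => intro k acc hk hf; omega
  | succ fuel ih =>
    intro k acc hk hf
    by_cases hneg : PySem.Chars.findFrom s pvMarker (k : Int) none = -1
    · rw [pvFindLoop, if_neg (by simpa using hneg)]
      have hno : ¬ pvMarker <:+: s.drop k := (PySem.Chars.findFrom_natCast_eq_neg_one_iff s pvMarker k hk).mp hneg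
      have : (pvOccs s).filter (fun j => decide (k ≤ j)) = [] := by
        rw [List.filter_eq_nil_iff]
        intro j hj hkj
        simp only [decide_eq_true_eq] at hkj
        have hpre := pvMem_occs.mp hj
        apply hno
        have h2 : pvMarker <+: (s.drop k).drop (j - k) := by
          rw [List.drop_drop, show k + (j - k) = j from by omega]
          exact hpre
        exact h2.isInfix.trans (List.drop_suffix (j-k) (s.drop k)).isInfix
      simp [this]
    · have hspec := PySem.Chars.findFrom_natCast_spec s pvMarker k hk hneg
      set i := PySem.Chars.findFrom s pvMarker (k : Int) none with hi
      obtain ⟨hki, hpre, hmin⟩ := hspec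
      have h0i : 0 ≤ i := le_trans (by exact_mod_cast Nat.zero_le k) hki
      set a := i.toNat with hadef
      have hia : i = (a : Int) := by omega
      have hasucc : i + 1 = ((a + 1 : Nat) : Int) := by omega
      have halen : a < s.length := by
        have := hpre.length_le
        have hm : pvMarker.length = 8 := by decide
        simp [List.length_drop] at this
        omega
      rw [pvFindLoop, if_pos (by simpa using hneg), hasucc,
        ih (a+1) (acc ++ [i]) (by omega) (by omega)]
      have hmem : a ∈ pvOccs s := pvMem_occs.mpr hpre
      have hrw := pvFilter_min (pvOccs s) (pvOccs_sorted s) a k hmem (by omega) ?_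
      · rw [hrw]
        simp [hia]
      · intro j hj hkj
        by_contra hcon
        exact absurd (pvMem_occs.mp hj) (hmin j hkj (by omega))

theorem pvOffs_eq (s : List Char) :
    pvFindLoop s pvMarker (s.length + 1) [] (PySem.Chars.find s pvMarker) =
      (pvOccs s).map Int.ofNat := by
  have h := pvFindLoop_spec s (s.length + 1) 0 [] (Nat.zero_le _) (by omega)
  rw [show ((0 : Nat) : Int) = 0 by rfl, PySem.Chars.findFrom_zero] at h
  simpa using h

theorem pvBis_spec (offs : List Int) (mlen limit : Int)
    (hmono : ∀ i j : Nat, (hi : i < offs.length) → (hj : j < offs.length) → i ≤ j → offs[i] ≤ offs[j]) :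
    ∀ lo hi : Int, 0 ≤ lo → lo ≤ hi → hi ≤ (offs.length : Int) →
    (∀ idx : Int, 0 ≤ idx → idx < lo → PySem.List.pyGetD offs idx 0 + mlen ≤ limit) →
    (∀ idx : Int, hi ≤ idx → idx < (offs.length : Int) → ¬ PySem.List.pyGetD offs idx 0 + mlen ≤ limit) →
    0 ≤ pvBis offs mlen limit lo hi ∧ pvBis offs mlen limit lo hi ≤ (offs.length : Int) ∧
    (∀ idx : Int, 0 ≤ idx → idx < pvBis offs mlen limit lo hi → PySem.List.pyGetD offs idx 0 + mlen ≤ limit) ∧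
    (∀ idx : Int, pvBis offs mlen limit lo hi ≤ idx → idx < (offs.length : Int) → ¬ PySem.List.pyGetD offs idx 0 + mlen ≤ limit) := by
  intro lo hi
  induction lo, hi using pvBis.induct offs mlen limit with
  | case1 lo hi h mid hpred ih =>
    intro h0 hlh hhl hbelow habove
    have hmid := PySem.Int.floordiv_two_mid_bounds (le_of_lt h)
    have hmidlt : mid < hi := by
      simp only [mid]
      rw [PySem.Int.floordiv_lt_iff_lt_mul (by omega)]
      omega
    rw [pvBis, dif_pos h, if_pos hpred]
    apply ih (by omega) (by omega) (by omega)
    · intro idx hidx hlt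
      by_cases hcase : idx < lo
      · exact hbelow idx hidx hcase
      · -- lo ≤ idx ≤ mid < hi ≤ len: use monotonicity against mid
        have hidxlen : idx < (offs.length : Int) := by omega
        have hmlen : mid < (offs.length : Int) := by omega
        rw [PySem.List.pyGetD_eq_getElem offs 0 hidx hidxlen]
        rw [PySem.List.pyGetD_eq_getElem offs 0 (by omega : (0:Int) ≤ mid) hmlen] at hpred
        have := hmono idx.toNat mid.toNat (by omega) (by omega) (by omega)
        omega
    · exact habove
  | case2 lo hi h mid hpred ih =>
    intro h0 hlh hhl hbelow habove
    have hmid := PySem.Int.floordiv_two_mid_bounds (le_of_lt h)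
    have hmidlt : mid < hi := by
      simp only [mid]
      rw [PySem.Int.floordiv_lt_iff_lt_mul (by omega)]
      omega
    rw [pvBis, dif_pos h, if_neg hpred]
    apply ih h0 (by omega) (by omega) hbelow
    · intro idx hmi hidx
      -- mid ≤ idx < len: ¬ pred by monotonicity against mid
      intro hple
      apply hpred
      have hmlen : mid < (offs.length : Int) := by omega
      rw [PySem.List.pyGetD_eq_getElem offs 0 (by omega : (0:Int) ≤ idx) hidx] at hple
      rw [PySem.List.pyGetD_eq_getElem offs 0 (by omega : (0:Int) ≤ mid) hmlen]
      have := hmono mid.toNat idx.toNat (by omega) (by omega) (by omega)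
      omega
  | case3 lo hi h =>
    intro h0 hlh hhl hbelow habove
    rw [pvBis, dif_neg h]
    exact ⟨h0, by omega, hbelow, by intro idx h1 h2; exact habove idx (by omega) h2⟩

theorem pvEnd_eq (s : List Char) (cs start : Int) (hcs : 1 ≤ cs) (h0 : 0 ≤ start)
    (hlt : start + cs < (s.length : Int)) :
    (if PySem.Chars.rfindFrom s pvMarker start (some (start + cs)) > start + PySem.Int.floordiv cs 2
     then PySem.Chars.rfindFrom s pvMarker start (some (start + cs)) else start + cs) =
    (if pvBis ((pvOccs s).map Int.ofNat) (pvMarker.length : Int) (start + cs) 0 (((pvOccs s).map Int.ofNat).length : Int) > 0 ∧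
        PySem.List.pyGetD ((pvOccs s).map Int.ofNat) (pvBis ((pvOccs s).map Int.ofNat) (pvMarker.length : Int) (start + cs) 0 (((pvOccs s).map Int.ofNat).length : Int) - 1) 0 > start + PySem.Int.floordiv cs 2 then
       PySem.List.pyGetD ((pvOccs s).map Int.ofNat) (pvBis ((pvOccs s).map Int.ofNat) (pvMarker.length : Int) (start + cs) 0 (((pvOccs s).map Int.ofNat).length : Int) - 1) 0
     else start + cs) := by
  set offs := (pvOccs s).map Int.ofNat with hoffs0
  have hhalf : 0 ≤ PySem.Int.floordiv cs 2 := by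
    rw [PySem.Int.floordiv_eq_ediv_of_pos (by omega)]
    omega
  have hoffs : offs = (pvOccs s).map Int.ofNat := hoffs0
  have hmlen : (pvMarker.length : Int) = 8 := by decide
  have hlen_eq : offs.length = (pvOccs s).length := by rw [hoffs, List.length_map]
  have hget : ∀ idx : Nat, (h : idx < offs.length) → offs[idx] = ((pvOccs s)[idx]'(by omega) : Int) := by
    intro idx h
    simp only [hoffs, List.getElem_map, Int.ofNat_eq_natCast]
  have hmono : ∀ i j : Nat, (hi : i < offs.length) → (hj : j < offs.length) → i ≤ j → offs[i] ≤ offs[j] := by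
    intro i j hi hj hij
    rcases Nat.lt_or_ge i j with h | h
    · have hp := List.pairwise_iff_getElem.mp (pvOccs_sorted s) i j (by omega) (by omega) h
      rw [hget i hi, hget j hj]
      exact_mod_cast le_of_lt hp
    · have : i = j := by omega
      subst this; rfl
  obtain ⟨hr0, hrlen, hrbelow, hrabove⟩ :=
    pvBis_spec offs (pvMarker.length : Int) (start + cs) hmono 0 (offs.length : Int)
      (le_refl 0) (by exact_mod_cast Int.natCast_nonneg _) (le_refl _)
      (by intro idx h1 h2; exact absurd (lt_of_le_of_lt h1 h2) (lt_irrefl _))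
      (by intro idx h1 h2; exact absurd (lt_of_le_of_lt h1 h2) (lt_irrefl _))
  set r := pvBis offs (pvMarker.length : Int) (start + cs) 0 (offs.length : Int) with hr
  -- occurrences vs offs entries
  have hocc_idx : ∀ j : Nat, pvMarker <+: s.drop j → ∃ idx : Nat, ∃ h : idx < offs.length, offs[idx] = (j : Int) := by
    intro j hj
    obtain ⟨idx, hidx, hval⟩ := List.mem_iff_getElem.mp (pvMem_occs.mpr hj)
    have hlen : idx < offs.length := by omega
    refine ⟨idx, hlen, ?_⟩
    rw [hget idx hlen]
    exact congrArg (fun n : Nat => (n : Int)) hval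
  have hpredval : ∀ idx : Nat, (h : idx < offs.length) → PySem.List.pyGetD offs (idx : Int) 0 = offs[idx] := by
    intro idx h
    rw [PySem.List.pyGetD_eq_getElem offs 0 (by omega) (by exact_mod_cast h)]
    simp
  set st := start.toNat with hst
  set eN := (start + cs).toNat with heN
  have hstc : (st : Int) = start := by omega
  have heNc : (eN : Int) = start + cs := by omega
  have hspec := pvRfindFrom_spec s st eN (by omega) (by omega)
  rw [hstc, heNc] at hspec
  by_cases hrz : r ≤ 0
  · -- no offset fits the window at all
    have hrz' : r = 0 := by omega
    rcases hspec with ⟨hval, hnone⟩ | ⟨i, hi1, hi2, hi3, hval, hmax⟩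
    · rw [hval]
      rw [if_neg (by omega)]
      rw [if_neg (by rintro ⟨h1, h2⟩; omega)]
    · exfalso
      obtain ⟨idx, hidxlen, hidxval⟩ := hocc_idx i hi3
      have := hrabove idx (by omega) (by exact_mod_cast hidxlen)
      rw [hpredval idx hidxlen, hidxval] at this
      omega
  · -- r ≥ 1 : q = offs[r-1] is the largest offset with q + 8 ≤ start + cs
    have hr1 : 0 ≤ r - 1 := by omega
    have hr1lt : r - 1 < (offs.length : Int) := by omega
    have hjql : (r-1).toNat < (pvOccs s).length := by omega
    have hq0 := PySem.List.pyGetD_eq_getElem offs 0 hr1 hr1lt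
    set q := PySem.List.pyGetD offs (r - 1) 0 with hqdef
    have hqval : q = ((pvOccs s)[(r-1).toNat]'hjql : Int) := by
      rw [hq0, hget _ (by omega)]
    have hqnn : 0 ≤ q := by rw [hqval]; exact Int.natCast_nonneg _
    have hqocc : pvMarker <+: s.drop q.toNat := by
      have hm := pvMem_occs.mp (List.getElem_mem hjql)
      have hqe : q.toNat = (pvOccs s)[(r-1).toNat]'hjql := by omega
      rw [hqe]; exact hm
    have hqpred : q + 8 ≤ start + cs := by
      have := hrbelow (r-1) hr1 (by omega)
      omega
    have hqmax : ∀ j : Nat, pvMarker <+: s.drop j → (j : Int) + 8 ≤ start + cs → (j : Int) ≤ q := by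
      intro j hjpre hjle
      obtain ⟨idx, hidxlen, hidxval⟩ := hocc_idx j hjpre
      have hidxr : (idx : Int) < r := by
        by_contra hc
        have := hrabove idx (by omega) (by exact_mod_cast hidxlen)
        rw [hpredval idx hidxlen, hidxval] at this
        omega
      have hmle := hmono idx (r-1).toNat hidxlen (by omega) (by omega)
      have hqelem : q = offs[(r-1).toNat]'(by omega) := hq0
      omega
    by_cases hqs : start ≤ q
    · -- the rfind finds exactly q
      have hpb : PySem.Chars.rfindFrom s pvMarker start (some (start + cs)) = q := by
        rcases hspec with ⟨hval, hnone⟩ | ⟨i, hi1, hi2, hi3, hval, hmax⟩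
        · exact absurd hqocc (hnone q.toNat (by omega) (by omega))
        · rw [hval]
          have h1 : (i : Int) ≤ q := hqmax i hi3 (by omega)
          have h2 : q.toNat ≤ i := hmax q.toNat (by omega) (by omega) hqocc
          omega
      rw [hpb]
      simp only [gt_iff_lt]
      by_cases hcond : start + PySem.Int.floordiv cs 2 < q
      · rw [if_pos hcond, if_pos ⟨by omega, hcond⟩]
      · rw [if_neg hcond, if_neg (by rintro ⟨h1, h2⟩; exact hcond h2)]
    · -- largest fitting offset is before start: rfind misses, and B's guard fails too
      have hpb : PySem.Chars.rfindFrom s pvMarker start (some (start + cs)) = -1 := by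
        rcases hspec with ⟨hval, _⟩ | ⟨i, hi1, hi2, hi3, hval, hmax⟩
        · exact hval
        · exfalso
          have := hqmax i hi3 (by omega)
          omega
      rw [hpb]
      rw [if_neg (by omega), if_neg (by rintro ⟨h1, h2⟩; omega)]

-- the two loop-body end computations agree
theorem pvEndAB (s : List Char) (cs start : Int) (hcs : 1 ≤ cs) (h0 : 0 ≤ start) :
    pvEndA s cs start = pvEndB s cs ((pvOccs s).map Int.ofNat) start := by
  unfold pvEndA pvEndB
  by_cases hlt : start + cs < (s.length : Int)
  · simp only [if_pos hlt]
    exact pvEnd_eq s cs start hcs h0 hlt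
  · simp only [if_neg hlt]

theorem pvEndA_pos (s : List Char) (cs start : Int) (hcs : 1 ≤ cs) (h0 : 0 ≤ start) :
    0 < pvEndA s cs start := by
  have hhalf : 0 ≤ PySem.Int.floordiv cs 2 := by
    rw [PySem.Int.floordiv_eq_ediv_of_pos (by omega)]
    omega
  unfold pvEndA
  by_cases hlt : start + cs < (s.length : Int)
  · simp only [if_pos hlt]
    split <;> omega
  · simp only [if_neg hlt]
    omega

theorem pvLoop_eq (s : List Char) (cs : Int) (hcs : 1 ≤ cs) :
    ∀ (fuel : Nat) (chunks : List (List Char)) (start : Int), 0 ≤ start →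
    pvLoopA s cs fuel chunks start = pvLoopB s cs ((pvOccs s).map Int.ofNat) fuel chunks start := by
  intro fuel
  induction fuel with
  | zero => intro chunks start h0; rfl
  | succ fuel ih =>
    intro chunks start h0
    rw [pvLoopA, pvLoopB]
    by_cases hstart : start < (s.length : Int)
    · rw [if_pos hstart, if_pos hstart, ← pvEndAB s cs start hcs h0]
      exact ih _ _ (le_of_lt (pvEndA_pos s cs start hcs h0))
    · rw [if_neg hstart, if_neg hstart]

-- ===== VERDICT (by name: the statement is the Claim_ definition above) =====
theorem simple_chunk_py_spec : Claim_equal_simple_chunk_py := by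
  intro text cs _ hpre
  unfold Spec_simple_chunk_py
  rcases hpre with h | h
  · subst h
    rfl
  · unfold simple_chunk_py simple_chunk_py_alt
    simp only [pvOffs_eq]
    rw [pvLoop_eq text.toList cs h _ _ _ (le_refl 0)]
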